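-- pv_equiv track=rewrite | github.com/HUST-hetaisheng/Tokamak | src/models/ultra_transfer/data.py | _rebalance_val_subsets_for_binary
-- ===== SOURCE A (Python) =====
-- from typing import Any, Dict, List, Mapping, Sequence
--
-- def _count_labels(
--     shot_ids: Sequence[int],
--     label_map: Mapping[int, int],
-- ) -> dict[str, int]:
--     arr = [int(label_map.get(int(sid), 0)) for sid in shot_ids]
--     n_pos = int(sum(1 for v in arr if v == 1))
--     n_neg = int(sum(1 for v in arr if v == 0))
--     return {"total": int(len(arr)), "n_pos": n_pos, "n_neg": n_neg}
--
-- def _move_one_of_class(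
--     src: list[int],
--     dst: list[int],
--     label_map: Mapping[int, int],
--     target_cls: int,
-- ) -> bool:
--     for sid in sorted(src):
--         if int(label_map.get(int(sid), 0)) == int(target_cls):
--             src.remove(sid)
--             dst.append(sid)
--             return True
--     return False
--
-- def _rebalance_val_subsets_for_binary(
--     calib_ids: Sequence[int],
--     thresh_ids: Sequence[int],
--     label_map: Mapping[int, int],
-- ) -> tuple[list[int], list[int], dict[str, int]]:
--     calib = [int(x) for x in calib_ids]
--     thresh = [int(x) for x in thresh_ids]
--     moves = {"to_calib": 0, "to_thresh": 0}
--
--     for cls in (1, 0):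
--         calib_stats = _count_labels(calib, label_map)
--         thresh_stats = _count_labels(thresh, label_map)
--
--         if (
--             calib_stats[f"n_{'pos' if cls == 1 else 'neg'}"] == 0
--             and thresh_stats[f"n_{'pos' if cls == 1 else 'neg'}"] > 1
--         ):
--             if _move_one_of_class(thresh, calib, label_map, target_cls=cls):
--                 moves["to_calib"] += 1
--
--         calib_stats = _count_labels(calib, label_map)
--         thresh_stats = _count_labels(thresh, label_map)
--         if (
--             thresh_stats[f"n_{'pos' if cls == 1 else 'neg'}"] == 0
--             and calib_stats[f"n_{'pos' if cls == 1 else 'neg'}"] > 1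
--         ):
--             if _move_one_of_class(calib, thresh, label_map, target_cls=cls):
--                 moves["to_thresh"] += 1
--
--     return sorted(calib), sorted(thresh), moves
-- ===== SOURCE B (Python) =====
-- def _rebalance_val_subsets_for_binary(calib_ids, thresh_ids, label_map):
--     # Plan-then-apply: index ids by label once; because moving a class-c element
--     # never changes the other class's groups, both per-class decisions can be
--     # taken from the ORIGINAL static index, then all moves applied in one batch.
--     calib = [int(x) for x in calib_ids]
--     thresh = [int(x) for x in thresh_ids]
--     c_grp = {}
--     t_grp = {}
--     for s in calib:
--         c_grp.setdefault(int(label_map.get(s, 0)), []).append(s)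
--     for s in thresh:
--         t_grp.setdefault(int(label_map.get(s, 0)), []).append(s)
--     incoming_calib = []   # planned moves thresh -> calib
--     incoming_thresh = []  # planned moves calib -> thresh
--     for cls in (1, 0):
--         cg = c_grp.get(cls, [])
--         tg = t_grp.get(cls, [])
--         if not cg and len(tg) > 1:
--             incoming_calib.append(min(tg))
--         elif not tg and len(cg) > 1:
--             incoming_thresh.append(min(cg))
--     new_calib = calib + incoming_calib
--     new_thresh = thresh + incoming_thresh
--     for m in incoming_calib:
--         new_thresh.remove(m)
--     for m in incoming_thresh:
--         new_calib.remove(m)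
--     return sorted(new_calib), sorted(new_thresh), {
--         "to_calib": len(incoming_calib),
--         "to_thresh": len(incoming_thresh),
--     }
-- ===== Notes on version B (the rewrite author's own statement) =====
-- stated objective: faster
-- what changed: B builds a label->ids index in one pass and PLANS both per-class moves from the original static groups (valid because moving a class-c element never changes the other class's group), then applies the whole move plan in one batch; A instead simulates sequential passes, mutating the lists and re-counting all labels with fresh full dict-lookup scans between every sub-check and sorting the source list before each move.
import Mathlib
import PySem

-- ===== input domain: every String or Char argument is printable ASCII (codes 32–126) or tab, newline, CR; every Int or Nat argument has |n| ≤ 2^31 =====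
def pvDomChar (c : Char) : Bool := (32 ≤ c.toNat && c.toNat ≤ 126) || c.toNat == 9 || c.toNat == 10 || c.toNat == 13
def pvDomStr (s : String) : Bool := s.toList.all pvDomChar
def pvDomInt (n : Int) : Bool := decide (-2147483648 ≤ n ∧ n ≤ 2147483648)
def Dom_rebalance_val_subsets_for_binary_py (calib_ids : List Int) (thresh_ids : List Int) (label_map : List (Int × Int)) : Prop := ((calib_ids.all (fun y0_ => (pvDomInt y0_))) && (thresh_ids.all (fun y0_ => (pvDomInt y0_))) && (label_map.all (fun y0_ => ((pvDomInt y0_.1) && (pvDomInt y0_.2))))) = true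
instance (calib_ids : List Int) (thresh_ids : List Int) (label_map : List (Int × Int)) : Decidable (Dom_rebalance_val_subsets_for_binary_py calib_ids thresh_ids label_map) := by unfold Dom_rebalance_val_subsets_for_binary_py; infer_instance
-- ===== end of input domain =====

-- B replaces A's mutate-and-recount simulation by a plan-then-apply scheme: one label→ids
-- index built up front, both per-class decisions taken from the static index, moves applied
-- in one batch (valid because moving a class-c element never changes the other class's group).

-- ===== PORT A =====

-- port of _count_labels
def pvCountLabels (shot_ids : List Int) (label_map : List (Int × Int)) : PySem.Dict String Int :=
  let arr := shot_ids.map (fun sid => (PySem.Dict.mk label_map).getD sid 0)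
  let n_pos : Int := arr.foldl (fun acc v => if v == 1 then acc + 1 else acc) 0
  let n_neg : Int := arr.foldl (fun acc v => if v == 0 then acc + 1 else acc) 0
  PySem.Dict.mk [("total", (arr.length : Int)), ("n_pos", n_pos), ("n_neg", n_neg)]

-- the 'for sid in sorted(src)' loop of _move_one_of_class
def pvMoveLoop (src dst : List Int) (label_map : List (Int × Int)) (target_cls : Int) :
    List Int → List Int × List Int × Bool
  | [] => (src, dst, false)
  | sid :: rest =>
    if (PySem.Dict.mk label_map).getD sid 0 == target_cls then
      -- src.remove(sid): sid ∈ src here, so remove? never fails (ValueError impossible)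
      ((PySem.List.remove? src sid).getD src, dst ++ [sid], true)
    else pvMoveLoop src dst label_map target_cls rest

-- port of _move_one_of_class; returns (src, dst, found)
def pvMoveOne (src dst : List Int) (label_map : List (Int × Int)) (target_cls : Int) :
    List Int × List Int × Bool :=
  pvMoveLoop src dst label_map target_cls (PySem.List.sorted src (fun x => x) false)

-- one iteration of A's 'for cls in (1, 0)' loop, state = (calib, thresh, moves)
def pvStepA (label_map : List (Int × Int)) (st : List Int × List Int × PySem.Dict String Int)
    (cls : Int) : List Int × List Int × PySem.Dict String Int :=
  let calib := st.1; let thresh := st.2.1; let moves := st.2.2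
  let key := "n_" ++ (if cls == 1 then "pos" else "neg")
  let calib_stats := pvCountLabels calib label_map
  let thresh_stats := pvCountLabels thresh label_map
  let st1 : List Int × List Int × PySem.Dict String Int :=
    if calib_stats.getD key 0 == 0 && decide (1 < thresh_stats.getD key 0) then
      let r := pvMoveOne thresh calib label_map cls
      if r.2.2 then (r.2.1, r.1, moves.modify "to_calib" 0 (· + 1))
      else (r.2.1, r.1, moves)
    else (calib, thresh, moves)
  let calib_stats2 := pvCountLabels st1.1 label_map
  let thresh_stats2 := pvCountLabels st1.2.1 label_map
  if thresh_stats2.getD key 0 == 0 && decide (1 < calib_stats2.getD key 0) then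
    let r := pvMoveOne st1.1 st1.2.1 label_map cls
    if r.2.2 then (r.1, r.2.1, st1.2.2.modify "to_thresh" 0 (· + 1))
    else (r.1, r.2.1, st1.2.2)
  else st1

def rebalance_val_subsets_for_binary_py (calib_ids : List Int) (thresh_ids : List Int) (label_map : List (Int × Int)) : List Int × List Int × (List (String × Int)) :=
  let calib := calib_ids.map (fun x => x)   -- int(x) is the identity on Int
  let thresh := thresh_ids.map (fun x => x)
  let moves : PySem.Dict String Int := PySem.Dict.mk [("to_calib", 0), ("to_thresh", 0)]
  let fin := [(1 : Int), 0].foldl (pvStepA label_map) (calib, thresh, moves)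
  (PySem.List.sorted fin.1 (fun x => x) false, PySem.List.sorted fin.2.1 (fun x => x) false,
   fin.2.2.items)

-- ===== PORT B =====

-- int(label_map.get(s, 0))
def pvLab (label_map : List (Int × Int)) (s : Int) : Int := (PySem.Dict.mk label_map).getD s 0

-- the 'setdefault(..., []).append(s)' grouping loop: label -> list of sids, one pass
def pvGroup (label_map : List (Int × Int)) (xs : List Int) : PySem.Dict Int (List Int) :=
  (xs.map (fun s => (pvLab label_map s, s))).foldl
    (fun d p => d.modify p.1 [] (· ++ [p.2])) (PySem.Dict.mk [])

-- one iteration of B's planning loop, state = (incoming_calib, incoming_thresh)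
def pvPlanStep (cg tg : PySem.Dict Int (List Int)) (st : List Int × List Int) (cls : Int) :
    List Int × List Int :=
  let cgl := cg.getD cls []
  let tgl := tg.getD cls []
  if cgl.isEmpty && decide (1 < tgl.length) then
    (st.1 ++ [(PySem.List.min? tgl (fun x => x)).getD 0], st.2)   -- tgl ≠ [], so min? is some
  else if tgl.isEmpty && decide (1 < cgl.length) then
    (st.1, st.2 ++ [(PySem.List.min? cgl (fun x => x)).getD 0])   -- cgl ≠ [], so min? is some
  else st

def rebalance_val_subsets_for_binary_py_alt (calib_ids : List Int) (thresh_ids : List Int) (label_map : List (Int × Int)) : List Int × List Int × (List (String × Int)) :=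
  let calib := calib_ids.map (fun x => x)
  let thresh := thresh_ids.map (fun x => x)
  let cg := pvGroup label_map calib
  let tg := pvGroup label_map thresh
  let plan := [(1 : Int), 0].foldl (pvPlanStep cg tg) ([], [])
  -- planned elements are members of their source lists, so remove? never fails
  let new_calib := plan.2.foldl (fun l m => (PySem.List.remove? l m).getD l) (calib ++ plan.1)
  let new_thresh := plan.1.foldl (fun l m => (PySem.List.remove? l m).getD l) (thresh ++ plan.2)
  (PySem.List.sorted new_calib (fun x => x) false, PySem.List.sorted new_thresh (fun x => x) false,
   [("to_calib", (plan.1.length : Int)), ("to_thresh", (plan.2.length : Int))])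

-- ===== PRECONDITION & SPEC =====
def Spec_rebalance_val_subsets_for_binary_py (calib_ids : List Int) (thresh_ids : List Int) (label_map : List (Int × Int)) (out : List Int × List Int × (List (String × Int))) : Prop := out = rebalance_val_subsets_for_binary_py_alt calib_ids thresh_ids label_map
instance (calib_ids : List Int) (thresh_ids : List Int) (label_map : List (Int × Int)) (out : List Int × List Int × (List (String × Int))) : Decidable (Spec_rebalance_val_subsets_for_binary_py calib_ids thresh_ids label_map out) := by unfold Spec_rebalance_val_subsets_for_binary_py; infer_instance

-- ===== CLAIM (what is proved, stated in full; the proofs are below) =====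
def Claim_equal_rebalance_val_subsets_for_binary_py : Prop := ∀ (calib_ids : List Int) (thresh_ids : List Int) (label_map : List (Int × Int)), Dom_rebalance_val_subsets_for_binary_py calib_ids thresh_ids label_map → Spec_rebalance_val_subsets_for_binary_py calib_ids thresh_ids label_map (rebalance_val_subsets_for_binary_py calib_ids thresh_ids label_map)

-- ===== LEMMAS AND PROOFS =====

-- proof-side normal form of one A-iteration: state (calib, thresh, to_calib, to_thresh)
def pvSeqStep (label_map : List (Int × Int)) (st : List Int × List Int × Int × Int)
    (cls : Int) : List Int × List Int × Int × Int :=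
  let calib := st.1; let thresh := st.2.1
  let c_grp := calib.filter (fun s => (PySem.Dict.mk label_map).getD s 0 == cls)
  let t_grp := thresh.filter (fun s => (PySem.Dict.mk label_map).getD s 0 == cls)
  if c_grp.isEmpty && decide (1 < t_grp.length) then
    let m := (PySem.List.min? t_grp (fun x => x)).getD 0
    (calib ++ [m], (PySem.List.remove? thresh m).getD thresh, st.2.2.1 + 1, st.2.2.2)
  else if t_grp.isEmpty && decide (1 < c_grp.length) then
    let m := (PySem.List.min? c_grp (fun x => x)).getD 0
    ((PySem.List.remove? calib m).getD calib, thresh ++ [m], st.2.2.1, st.2.2.2 + 1)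
  else st

theorem count_key (xs : List Int) (lm : List (Int × Int)) (cls : Int) (h : cls = 1 ∨ cls = 0) :
    (pvCountLabels xs lm).getD ("n_" ++ (if cls == 1 then "pos" else "neg")) 0 =
      ((xs.filter (fun s => (PySem.Dict.mk lm).getD s 0 == cls)).length : Int) := by
  rcases h with rfl | rfl <;>
    simp [pvCountLabels, PySem.Dict.getD_eq_get?_getD, PySem.Dict.get?_mk_cons,
      PySem.List.foldl_ite_add_one, List.countP_map,
      ← List.countP_eq_length_filter] <;>
      exact List.countP_congr (fun a _ => by simp)

theorem find?_sorted_min {p : Int → Bool} {l : List Int} {m : Int}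
    (hs : l.Pairwise (· ≤ ·)) (hf : l.find? p = some m) :
    ∀ y ∈ l, p y → m ≤ y := by
  induction l with
  | nil => simp at hf
  | cons a l ih =>
    rw [List.find?_cons] at hf
    rcases List.pairwise_cons.mp hs with ⟨ha, hs'⟩
    by_cases hpa : p a
    · simp [hpa] at hf
      subst hf
      intro y hy _
      rcases List.mem_cons.mp hy with rfl | hy
      · exact le_refl _
      · exact ha y hy
    · simp [hpa] at hf
      intro y hy hpy
      rcases List.mem_cons.mp hy with rfl | hy
      · exact absurd hpy hpa
      · exact ih hs' hf y hy hpy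

theorem moveLoop_spec (src dst : List Int) (lm : List (Int × Int)) (cls : Int)
    (l : List Int) :
    pvMoveLoop src dst lm cls l =
      match l.find? (fun s => (PySem.Dict.mk lm).getD s 0 == cls) with
      | none => (src, dst, false)
      | some m => ((PySem.List.remove? src m).getD src, dst ++ [m], true) := by
  induction l with
  | nil => rfl
  | cons a l ih =>
    rw [List.find?_cons]
    by_cases hpa : ((PySem.Dict.mk lm).getD a 0 == cls) = true
    · simp [pvMoveLoop, hpa]
    · simp [pvMoveLoop, hpa, ih]

theorem moveOne_spec (src dst : List Int) (lm : List (Int × Int)) (cls : Int)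
    (hne : src.filter (fun s => (PySem.Dict.mk lm).getD s 0 == cls) ≠ []) :
    pvMoveOne src dst lm cls =
      ((PySem.List.remove? src ((PySem.List.min? (src.filter (fun s => (PySem.Dict.mk lm).getD s 0 == cls)) (fun x => x)).getD 0)).getD src,
       dst ++ [(PySem.List.min? (src.filter (fun s => (PySem.Dict.mk lm).getD s 0 == cls)) (fun x => x)).getD 0],
       true) := by
  obtain ⟨x, hxf⟩ := List.exists_mem_of_ne_nil _ hne
  obtain ⟨hxs, hPx⟩ := List.mem_filter.mp hxf
  obtain ⟨m, hf⟩ : ∃ m, (PySem.List.sorted src (fun x => x) false).find?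
      (fun s => (PySem.Dict.mk lm).getD s 0 == cls) = some m := by
    have : ((PySem.List.sorted src (fun x => x) false).find?
        (fun s => (PySem.Dict.mk lm).getD s 0 == cls)).isSome := by
      rw [List.find?_isSome]
      exact ⟨x, (PySem.List.mem_sorted _ _ _ _).mpr hxs, hPx⟩
    exact Option.isSome_iff_exists.mp this
  obtain ⟨m', hm'⟩ : ∃ m', PySem.List.min? (src.filter (fun s => (PySem.Dict.mk lm).getD s 0 == cls)) (fun x => x) = some m' := by
    have : PySem.List.min? (src.filter (fun s => (PySem.Dict.mk lm).getD s 0 == cls)) (fun x => x) ≠ none := by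
      intro h0
      exact hne ((PySem.List.min?_eq_none_iff _ _).mp h0)
    exact Option.ne_none_iff_exists'.mp this
  have hm'f := PySem.List.min?_mem hm'
  have hPm := List.find?_some hf
  have hmem : m ∈ src := (PySem.List.mem_sorted _ _ _ _).mp (List.mem_of_find?_eq_some hf)
  have h1 : m ≤ m' :=
    find?_sorted_min (PySem.List.sorted_pairwise (xs := src) (key := fun x => x)) hf m'
      ((PySem.List.mem_sorted _ _ _ _).mpr (List.mem_filter.mp hm'f).1) (List.mem_filter.mp hm'f).2
  have h2 : m' ≤ m := PySem.List.min?_isMin hm' m (List.mem_filter.mpr ⟨hmem, hPm⟩)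
  have hmm : m = m' := le_antisymm h1 h2
  rw [pvMoveOne, moveLoop_spec, hf, hm', hmm]
  rfl

theorem modify_tc (tc tt : Int) :
    (PySem.Dict.mk [("to_calib", tc), ("to_thresh", tt)]).modify "to_calib" 0 (· + 1)
      = PySem.Dict.mk [("to_calib", tc + 1), ("to_thresh", tt)] := by
  rfl

theorem modify_tt (tc tt : Int) :
    (PySem.Dict.mk [("to_calib", tc), ("to_thresh", tt)]).modify "to_thresh" 0 (· + 1)
      = PySem.Dict.mk [("to_calib", tc), ("to_thresh", tt + 1)] := by
  rfl

theorem condAB (xs ys : List Int) :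
    (((xs.length : Int)) == 0 && decide ((1:Int) < (ys.length : Int)))
      = (xs.isEmpty && decide (1 < ys.length)) := by
  cases xs <;> simp [Nat.one_lt_cast] <;> omega

theorem step_eq (lm : List (Int × Int)) (c t : List Int) (tc tt : Int) (cls : Int)
    (h : cls = 1 ∨ cls = 0) :
    pvStepA lm (c, t, PySem.Dict.mk [("to_calib", tc), ("to_thresh", tt)]) cls =
      ((pvSeqStep lm (c, t, tc, tt) cls).1, (pvSeqStep lm (c, t, tc, tt) cls).2.1,
       PySem.Dict.mk [("to_calib", (pvSeqStep lm (c, t, tc, tt) cls).2.2.1),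
                      ("to_thresh", (pvSeqStep lm (c, t, tc, tt) cls).2.2.2)]) := by
  have ck := fun xs => count_key xs lm cls h
  by_cases hcase1 : c.filter (fun s => (PySem.Dict.mk lm).getD s 0 == cls) = [] ∧
      1 < (t.filter (fun s => (PySem.Dict.mk lm).getD s 0 == cls)).length
  · obtain ⟨hc, ht⟩ := hcase1
    have htne : List.filter (fun s => (PySem.Dict.mk lm).getD s 0 == cls) t ≠ [] := by
      intro h0; rw [h0] at ht; simp at ht
    obtain ⟨m, hm⟩ : ∃ m, PySem.List.min? (List.filter (fun s => (PySem.Dict.mk lm).getD s 0 == cls) t) (fun x => x) = some m :=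
      Option.ne_none_iff_exists'.mp (fun h0 => htne ((PySem.List.min?_eq_none_iff _ _).mp h0))
    have hmf := PySem.List.min?_mem hm
    have hmt : m ∈ t := (List.mem_filter.mp hmf).1
    have hrem : (PySem.List.remove? t m).getD t = t.erase m := by
      rw [PySem.List.remove?_eq_some_erase t m hmt]; rfl
    have hlen : (List.filter (fun s => (PySem.Dict.mk lm).getD s 0 == cls) (t.erase m)).length
        = (List.filter (fun s => (PySem.Dict.mk lm).getD s 0 == cls) t).length - 1 := by
      rw [← List.erase_filter, List.length_erase_of_mem hmf]
    have hb1 : ((List.filter (fun s => (PySem.Dict.mk lm).getD s 0 == cls) c).isEmpty &&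
        decide (1 < (List.filter (fun s => (PySem.Dict.mk lm).getD s 0 == cls) t).length)) = true := by
      simp [hc, ht]
    have hne2 : List.filter (fun s => (PySem.Dict.mk lm).getD s 0 == cls) (t.erase m) ≠ [] := by
      intro h0; rw [h0] at hlen; simp at hlen; omega
    have hB : pvSeqStep lm (c, t, tc, tt) cls = (c ++ [m], t.erase m, tc + 1, tt) := by
      simp only [pvSeqStep, hb1]
      rw [hm]
      simp [hrem]
    have hA : pvStepA lm (c, t, PySem.Dict.mk [("to_calib", tc), ("to_thresh", tt)]) cls
        = (c ++ [m], t.erase m, PySem.Dict.mk [("to_calib", tc + 1), ("to_thresh", tt)]) := by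
      simp only [pvStepA, ck, condAB]
      rw [if_pos hb1]
      rw [moveOne_spec t c lm cls htne, hm]
      simp only [Option.getD_some]
      rw [hrem]
      rw [modify_tc]
      rw [if_neg (by simp [List.isEmpty_iff, hne2])]
      exact if_pos trivial
    rw [hA, hB]
  · by_cases hcase2 : t.filter (fun s => (PySem.Dict.mk lm).getD s 0 == cls) = [] ∧
        1 < (c.filter (fun s => (PySem.Dict.mk lm).getD s 0 == cls)).length
    · obtain ⟨ht, hcl⟩ := hcase2
      have hcne : List.filter (fun s => (PySem.Dict.mk lm).getD s 0 == cls) c ≠ [] := by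
        intro h0; rw [h0] at hcl; simp at hcl
      obtain ⟨m, hm⟩ : ∃ m, PySem.List.min? (List.filter (fun s => (PySem.Dict.mk lm).getD s 0 == cls) c) (fun x => x) = some m :=
        Option.ne_none_iff_exists'.mp (fun h0 => hcne ((PySem.List.min?_eq_none_iff _ _).mp h0))
      have hmf := PySem.List.min?_mem hm
      have hmc : m ∈ c := (List.mem_filter.mp hmf).1
      have hrem : (PySem.List.remove? c m).getD c = c.erase m := by
        rw [PySem.List.remove?_eq_some_erase c m hmc]; rfl
      have hb1 : ((List.filter (fun s => (PySem.Dict.mk lm).getD s 0 == cls) c).isEmpty &&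
          decide (1 < (List.filter (fun s => (PySem.Dict.mk lm).getD s 0 == cls) t).length)) = false := by
        simp [ht]
      have hb2 : ((List.filter (fun s => (PySem.Dict.mk lm).getD s 0 == cls) t).isEmpty &&
          decide (1 < (List.filter (fun s => (PySem.Dict.mk lm).getD s 0 == cls) c).length)) = true := by
        simp [ht, hcl]
      have hB : pvSeqStep lm (c, t, tc, tt) cls = (c.erase m, t ++ [m], tc, tt + 1) := by
        simp only [pvSeqStep, hb1, hb2]
        rw [hm]
        simp [hrem]
      have hA : pvStepA lm (c, t, PySem.Dict.mk [("to_calib", tc), ("to_thresh", tt)]) cls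
          = (c.erase m, t ++ [m], PySem.Dict.mk [("to_calib", tc), ("to_thresh", tt + 1)]) := by
        simp only [pvStepA, ck, condAB, hb1]
        simp only [Bool.false_eq_true, if_false]
        simp only [hb2]
        rw [moveOne_spec c t lm cls hcne, hm]
        simp [hrem, modify_tt]
      rw [hA, hB]
    · have hb1 : ((List.filter (fun s => (PySem.Dict.mk lm).getD s 0 == cls) c).isEmpty &&
          decide (1 < (List.filter (fun s => (PySem.Dict.mk lm).getD s 0 == cls) t).length)) = false := by
        by_cases h1 : List.filter (fun s => (PySem.Dict.mk lm).getD s 0 == cls) c = []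
        · have h2 : ¬ 1 < (List.filter (fun s => (PySem.Dict.mk lm).getD s 0 == cls) t).length :=
            fun hlt => hcase1 ⟨h1, hlt⟩
          simp [h2]
        · simp [List.isEmpty_iff, h1]
      have hb2 : ((List.filter (fun s => (PySem.Dict.mk lm).getD s 0 == cls) t).isEmpty &&
          decide (1 < (List.filter (fun s => (PySem.Dict.mk lm).getD s 0 == cls) c).length)) = false := by
        by_cases h1 : List.filter (fun s => (PySem.Dict.mk lm).getD s 0 == cls) t = []
        · have h2 : ¬ 1 < (List.filter (fun s => (PySem.Dict.mk lm).getD s 0 == cls) c).length :=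
            fun hlt => hcase2 ⟨h1, hlt⟩
          simp [h2]
        · simp [List.isEmpty_iff, h1]
      have hB : pvSeqStep lm (c, t, tc, tt) cls = (c, t, tc, tt) := by
        simp only [pvSeqStep, hb1, hb2]
        simp
      have hA : pvStepA lm (c, t, PySem.Dict.mk [("to_calib", tc), ("to_thresh", tt)]) cls
          = (c, t, PySem.Dict.mk [("to_calib", tc), ("to_thresh", tt)]) := by
        simp only [pvStepA, ck, condAB, hb1]
        simp only [Bool.false_eq_true, if_false]
        simp only [hb2]
        simp
      rw [hA, hB]

-- the grouping index reads back as a filter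
theorem group_getD (lm : List (Int × Int)) (xs : List Int) (cls : Int) :
    (pvGroup lm xs).getD cls [] = xs.filter (fun s => pvLab lm s == cls) := by
  rw [pvGroup, PySem.Dict.getD_foldl_modify_append]
  simp [List.filter_map, Function.comp_def, PySem.Dict.getD, PySem.Dict.get?, PySem.Dict.mk]

-- erasing an element the filter rejects does not change the filter
theorem filter_erase_not (p : Int → Bool) (a : Int) (h : p a = false) (l : List Int) :
    (l.erase a).filter p = l.filter p := by
  induction l with
  | nil => rfl
  | cons b l ih =>
    by_cases hba : b = a
    · subst hba; simp [List.erase_cons_head, List.filter_cons, h]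
    · rw [List.erase_cons_tail (by simp [hba])]
      simp only [List.filter_cons, ih]

-- characterizations of one sequential iteration
theorem seqStep_in (lm : List (Int × Int)) (c t : List Int) (tc tt cls m : Int)
    (hc : c.filter (fun s => (PySem.Dict.mk lm).getD s 0 == cls) = [])
    (ht : 1 < (t.filter (fun s => (PySem.Dict.mk lm).getD s 0 == cls)).length)
    (hm : PySem.List.min? (t.filter (fun s => (PySem.Dict.mk lm).getD s 0 == cls)) (fun x => x) = some m) :
    pvSeqStep lm (c, t, tc, tt) cls = (c ++ [m], t.erase m, tc + 1, tt) := by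
  have hmt : m ∈ t := (List.mem_filter.mp (PySem.List.min?_mem hm)).1
  have hrem : (PySem.List.remove? t m).getD t = t.erase m := by
    rw [PySem.List.remove?_eq_some_erase t m hmt]; rfl
  simp only [pvSeqStep]
  rw [if_pos (by simp [hc, ht])]
  rw [hm]
  simp [hrem]

theorem seqStep_out (lm : List (Int × Int)) (c t : List Int) (tc tt cls m : Int)
    (ht : t.filter (fun s => (PySem.Dict.mk lm).getD s 0 == cls) = [])
    (hc : 1 < (c.filter (fun s => (PySem.Dict.mk lm).getD s 0 == cls)).length)
    (hm : PySem.List.min? (c.filter (fun s => (PySem.Dict.mk lm).getD s 0 == cls)) (fun x => x) = some m) :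
    pvSeqStep lm (c, t, tc, tt) cls = (c.erase m, t ++ [m], tc, tt + 1) := by
  have hmc : m ∈ c := (List.mem_filter.mp (PySem.List.min?_mem hm)).1
  have hrem : (PySem.List.remove? c m).getD c = c.erase m := by
    rw [PySem.List.remove?_eq_some_erase c m hmc]; rfl
  simp only [pvSeqStep]
  rw [if_neg (by simp [ht]), if_pos (by simp [ht, hc])]
  rw [hm]
  simp [hrem]

theorem seqStep_none (lm : List (Int × Int)) (c t : List Int) (tc tt cls : Int)
    (h1 : ¬ (c.filter (fun s => (PySem.Dict.mk lm).getD s 0 == cls) = [] ∧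
        1 < (t.filter (fun s => (PySem.Dict.mk lm).getD s 0 == cls)).length))
    (h2 : ¬ (t.filter (fun s => (PySem.Dict.mk lm).getD s 0 == cls) = [] ∧
        1 < (c.filter (fun s => (PySem.Dict.mk lm).getD s 0 == cls)).length)) :
    pvSeqStep lm (c, t, tc, tt) cls = (c, t, tc, tt) := by
  simp only [pvSeqStep]
  rw [if_neg (by simp only [Bool.and_eq_true, List.isEmpty_iff, decide_eq_true_eq]; exact h1)]
  rw [if_neg (by simp only [Bool.and_eq_true, List.isEmpty_iff, decide_eq_true_eq]; exact h2)]

-- characterizations of one planning iteration (conditions over the filters via group_getD)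
theorem planStep_in (lm : List (Int × Int)) (c t : List Int) (ic it : List Int) (cls m : Int)
    (hc : c.filter (fun s => (PySem.Dict.mk lm).getD s 0 == cls) = [])
    (ht : 1 < (t.filter (fun s => (PySem.Dict.mk lm).getD s 0 == cls)).length)
    (hm : PySem.List.min? (t.filter (fun s => (PySem.Dict.mk lm).getD s 0 == cls)) (fun x => x) = some m) :
    pvPlanStep (pvGroup lm c) (pvGroup lm t) (ic, it) cls = (ic ++ [m], it) := by
  have hgc := group_getD lm c cls
  have hgt := group_getD lm t cls
  simp only [pvLab] at hgc hgt
  simp only [pvPlanStep]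
  rw [hgc, hgt, hm, if_pos (by simp [hc, ht])]
  rfl

theorem planStep_out (lm : List (Int × Int)) (c t : List Int) (ic it : List Int) (cls m : Int)
    (ht : t.filter (fun s => (PySem.Dict.mk lm).getD s 0 == cls) = [])
    (hc : 1 < (c.filter (fun s => (PySem.Dict.mk lm).getD s 0 == cls)).length)
    (hm : PySem.List.min? (c.filter (fun s => (PySem.Dict.mk lm).getD s 0 == cls)) (fun x => x) = some m) :
    pvPlanStep (pvGroup lm c) (pvGroup lm t) (ic, it) cls = (ic, it ++ [m]) := by
  have hgc := group_getD lm c cls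
  have hgt := group_getD lm t cls
  simp only [pvLab] at hgc hgt
  simp only [pvPlanStep]
  rw [hgc, hgt, hm, if_neg (by simp [ht]), if_pos (by simp [ht, hc])]
  rfl

theorem planStep_none (lm : List (Int × Int)) (c t : List Int) (ic it : List Int) (cls : Int)
    (h1 : ¬ (c.filter (fun s => (PySem.Dict.mk lm).getD s 0 == cls) = [] ∧
        1 < (t.filter (fun s => (PySem.Dict.mk lm).getD s 0 == cls)).length))
    (h2 : ¬ (t.filter (fun s => (PySem.Dict.mk lm).getD s 0 == cls) = [] ∧
        1 < (c.filter (fun s => (PySem.Dict.mk lm).getD s 0 == cls)).length)) :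
    pvPlanStep (pvGroup lm c) (pvGroup lm t) (ic, it) cls = (ic, it) := by
  have hgc := group_getD lm c cls
  have hgt := group_getD lm t cls
  simp only [pvLab] at hgc hgt
  simp only [pvPlanStep]
  rw [hgc, hgt]
  rw [if_neg (by simp only [Bool.and_eq_true, List.isEmpty_iff, decide_eq_true_eq]; exact h1)]
  rw [if_neg (by simp only [Bool.and_eq_true, List.isEmpty_iff, decide_eq_true_eq]; exact h2)]

-- appending an element the filter rejects does not change the filter
theorem filter_append_not (p : Int → Bool) (a : Int) (h : p a = false) (l : List Int) :
    (l ++ [a]).filter p = l.filter p := by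
  simp [List.filter_append, h]

-- the two sequential A-iterations compute exactly B's plan-then-apply result
theorem seq_eq_plan (lm : List (Int × Int)) (c t : List Int) :
    pvSeqStep lm (pvSeqStep lm (c, t, (0:Int), (0:Int)) 1) 0 =
      (let plan := [(1 : Int), 0].foldl (pvPlanStep (pvGroup lm c) (pvGroup lm t)) ([], []);
       (plan.2.foldl (fun l m => (PySem.List.remove? l m).getD l) (c ++ plan.1),
        plan.1.foldl (fun l m => (PySem.List.remove? l m).getD l) (t ++ plan.2),
        (plan.1.length : Int), (plan.2.length : Int))) := by
  have hq10 : ∀ s : Int, ((PySem.Dict.mk lm).getD s 0 == (1:Int)) = true →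
      ((PySem.Dict.mk lm).getD s 0 == (0:Int)) = false := by
    intro s h; simp_all
  have hq01 : ∀ s : Int, ((PySem.Dict.mk lm).getD s 0 == (0:Int)) = true →
      ((PySem.Dict.mk lm).getD s 0 == (1:Int)) = false := by
    intro s h; simp_all
  simp only [List.foldl]
  by_cases h1in : c.filter (fun s => (PySem.Dict.mk lm).getD s 0 == (1:Int)) = [] ∧
      1 < (t.filter (fun s => (PySem.Dict.mk lm).getD s 0 == (1:Int))).length
  · obtain ⟨hc1, ht1⟩ := h1in
    have htne : t.filter (fun s => (PySem.Dict.mk lm).getD s 0 == (1:Int)) ≠ [] := by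
      intro h0; rw [h0] at ht1; simp at ht1
    obtain ⟨m1, hm1⟩ : ∃ m1, PySem.List.min? (t.filter (fun s => (PySem.Dict.mk lm).getD s 0 == (1:Int))) (fun x => x) = some m1 :=
      Option.ne_none_iff_exists'.mp (fun h0 => htne ((PySem.List.min?_eq_none_iff _ _).mp h0))
    have hm1f := PySem.List.min?_mem hm1
    have hm1t : m1 ∈ t := (List.mem_filter.mp hm1f).1
    have hq0m1 : ((PySem.Dict.mk lm).getD m1 0 == (0:Int)) = false :=
      hq10 m1 (List.mem_filter.mp hm1f).2
    have e1 : (PySem.List.remove? t m1).getD t = t.erase m1 := by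
      rw [PySem.List.remove?_eq_some_erase t m1 hm1t]; rfl
    have hfc0 : (c ++ [m1]).filter (fun s => (PySem.Dict.mk lm).getD s 0 == (0:Int))
        = c.filter (fun s => (PySem.Dict.mk lm).getD s 0 == (0:Int)) :=
      filter_append_not _ m1 hq0m1 c
    have hft0 : (t.erase m1).filter (fun s => (PySem.Dict.mk lm).getD s 0 == (0:Int))
        = t.filter (fun s => (PySem.Dict.mk lm).getD s 0 == (0:Int)) :=
      filter_erase_not _ m1 hq0m1 t
    rw [seqStep_in lm c t 0 0 1 m1 hc1 ht1 hm1, planStep_in lm c t [] [] 1 m1 hc1 ht1 hm1]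
    simp only [zero_add, List.nil_append]
    by_cases h0in : c.filter (fun s => (PySem.Dict.mk lm).getD s 0 == (0:Int)) = [] ∧
        1 < (t.filter (fun s => (PySem.Dict.mk lm).getD s 0 == (0:Int))).length
    · obtain ⟨hc0, ht0⟩ := h0in
      have htne0 : t.filter (fun s => (PySem.Dict.mk lm).getD s 0 == (0:Int)) ≠ [] := by
        intro h0; rw [h0] at ht0; simp at ht0
      obtain ⟨m0, hm0⟩ : ∃ m0, PySem.List.min? (t.filter (fun s => (PySem.Dict.mk lm).getD s 0 == (0:Int))) (fun x => x) = some m0 :=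
        Option.ne_none_iff_exists'.mp (fun h0 => htne0 ((PySem.List.min?_eq_none_iff _ _).mp h0))
      have hm0f := PySem.List.min?_mem hm0
      have hm0t : m0 ∈ t := (List.mem_filter.mp hm0f).1
      have hne01 : m0 ≠ m1 := by
        intro h0
        have := (List.mem_filter.mp hm0f).2
        rw [h0] at this
        rw [hq0m1] at this
        exact Bool.false_ne_true this
      have hm0t' : m0 ∈ t.erase m1 := (List.mem_erase_of_ne hne01).mpr hm0t
      have e2 : (PySem.List.remove? (t.erase m1) m0).getD (t.erase m1) = (t.erase m1).erase m0 := by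
        rw [PySem.List.remove?_eq_some_erase _ m0 hm0t']; rfl
      rw [seqStep_in lm (c ++ [m1]) (t.erase m1) 1 0 0 m0 (hfc0.trans hc0)
        (by rw [hft0]; exact ht0) (by rw [hft0]; exact hm0)]
      rw [planStep_in lm c t [m1] [] 0 m0 hc0 ht0 hm0]
      simp [e1, e2]
    · by_cases h0out : t.filter (fun s => (PySem.Dict.mk lm).getD s 0 == (0:Int)) = [] ∧
          1 < (c.filter (fun s => (PySem.Dict.mk lm).getD s 0 == (0:Int))).length
      · obtain ⟨ht0, hc0⟩ := h0out
        have hcne0 : c.filter (fun s => (PySem.Dict.mk lm).getD s 0 == (0:Int)) ≠ [] := by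
          intro h0; rw [h0] at hc0; simp at hc0
        obtain ⟨m0, hm0⟩ : ∃ m0, PySem.List.min? (c.filter (fun s => (PySem.Dict.mk lm).getD s 0 == (0:Int))) (fun x => x) = some m0 :=
          Option.ne_none_iff_exists'.mp (fun h0 => hcne0 ((PySem.List.min?_eq_none_iff _ _).mp h0))
        have hm0f := PySem.List.min?_mem hm0
        have hm0c : m0 ∈ c := (List.mem_filter.mp hm0f).1
        have hm0c' : m0 ∈ c ++ [m1] := List.mem_append_left _ hm0c
        have e2 : (PySem.List.remove? (c ++ [m1]) m0).getD (c ++ [m1]) = (c ++ [m1]).erase m0 := by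
          rw [PySem.List.remove?_eq_some_erase _ m0 hm0c']; rfl
        rw [seqStep_out lm (c ++ [m1]) (t.erase m1) 1 0 0 m0 (hft0.trans ht0)
          (by rw [hfc0]; exact hc0) (by rw [hfc0]; exact hm0)]
        rw [planStep_out lm c t [m1] [] 0 m0 ht0 hc0 hm0]
        have e3 : (t ++ [m0]).erase m1 = t.erase m1 ++ [m0] := List.erase_append_left _ hm1t
        have e1' : (PySem.List.remove? (t ++ [m0]) m1).getD (t ++ [m0]) = (t ++ [m0]).erase m1 := by
          rw [PySem.List.remove?_eq_some_erase _ m1 (List.mem_append_left _ hm1t)]; rfl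
        simp [List.foldl, e2, e1', e3]
      · rw [seqStep_none lm (c ++ [m1]) (t.erase m1) 1 0 0
          (by rw [hfc0, hft0]; exact h0in) (by rw [hfc0, hft0]; exact h0out)]
        rw [planStep_none lm c t [m1] [] 0
          (by exact h0in) (by exact h0out)]
        simp [e1]
  · by_cases h1out : t.filter (fun s => (PySem.Dict.mk lm).getD s 0 == (1:Int)) = [] ∧
        1 < (c.filter (fun s => (PySem.Dict.mk lm).getD s 0 == (1:Int))).length
    · obtain ⟨ht1, hc1⟩ := h1out
      have hcne : c.filter (fun s => (PySem.Dict.mk lm).getD s 0 == (1:Int)) ≠ [] := by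
        intro h0; rw [h0] at hc1; simp at hc1
      obtain ⟨m1, hm1⟩ : ∃ m1, PySem.List.min? (c.filter (fun s => (PySem.Dict.mk lm).getD s 0 == (1:Int))) (fun x => x) = some m1 :=
        Option.ne_none_iff_exists'.mp (fun h0 => hcne ((PySem.List.min?_eq_none_iff _ _).mp h0))
      have hm1f := PySem.List.min?_mem hm1
      have hm1c : m1 ∈ c := (List.mem_filter.mp hm1f).1
      have hq0m1 : ((PySem.Dict.mk lm).getD m1 0 == (0:Int)) = false :=
        hq10 m1 (List.mem_filter.mp hm1f).2
      have e1 : (PySem.List.remove? c m1).getD c = c.erase m1 := by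
        rw [PySem.List.remove?_eq_some_erase c m1 hm1c]; rfl
      have hfc0 : (c.erase m1).filter (fun s => (PySem.Dict.mk lm).getD s 0 == (0:Int))
          = c.filter (fun s => (PySem.Dict.mk lm).getD s 0 == (0:Int)) :=
        filter_erase_not _ m1 hq0m1 c
      have hft0 : (t ++ [m1]).filter (fun s => (PySem.Dict.mk lm).getD s 0 == (0:Int))
          = t.filter (fun s => (PySem.Dict.mk lm).getD s 0 == (0:Int)) :=
        filter_append_not _ m1 hq0m1 t
      rw [seqStep_out lm c t 0 0 1 m1 ht1 hc1 hm1, planStep_out lm c t [] [] 1 m1 ht1 hc1 hm1]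
      simp only [zero_add, List.nil_append]
      by_cases h0in : c.filter (fun s => (PySem.Dict.mk lm).getD s 0 == (0:Int)) = [] ∧
          1 < (t.filter (fun s => (PySem.Dict.mk lm).getD s 0 == (0:Int))).length
      · obtain ⟨hc0, ht0⟩ := h0in
        have htne0 : t.filter (fun s => (PySem.Dict.mk lm).getD s 0 == (0:Int)) ≠ [] := by
          intro h0; rw [h0] at ht0; simp at ht0
        obtain ⟨m0, hm0⟩ : ∃ m0, PySem.List.min? (t.filter (fun s => (PySem.Dict.mk lm).getD s 0 == (0:Int))) (fun x => x) = some m0 :=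
          Option.ne_none_iff_exists'.mp (fun h0 => htne0 ((PySem.List.min?_eq_none_iff _ _).mp h0))
        have hm0f := PySem.List.min?_mem hm0
        have hm0t : m0 ∈ t := (List.mem_filter.mp hm0f).1
        have hm0t' : m0 ∈ t ++ [m1] := List.mem_append_left _ hm0t
        have e2 : (PySem.List.remove? (t ++ [m1]) m0).getD (t ++ [m1]) = (t ++ [m1]).erase m0 := by
          rw [PySem.List.remove?_eq_some_erase _ m0 hm0t']; rfl
        rw [seqStep_in lm (c.erase m1) (t ++ [m1]) 0 1 0 m0 (hfc0.trans hc0)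
          (by rw [hft0]; exact ht0) (by rw [hft0]; exact hm0)]
        rw [planStep_in lm c t [] [m1] 0 m0 hc0 ht0 hm0]
        have e3 : (c ++ [m0]).erase m1 = c.erase m1 ++ [m0] := List.erase_append_left _ hm1c
        have e1' : (PySem.List.remove? (c ++ [m0]) m1).getD (c ++ [m0]) = (c ++ [m0]).erase m1 := by
          rw [PySem.List.remove?_eq_some_erase _ m1 (List.mem_append_left _ hm1c)]; rfl
        simp [List.foldl, e2, e1', e3]
      · by_cases h0out : t.filter (fun s => (PySem.Dict.mk lm).getD s 0 == (0:Int)) = [] ∧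
            1 < (c.filter (fun s => (PySem.Dict.mk lm).getD s 0 == (0:Int))).length
        · obtain ⟨ht0, hc0⟩ := h0out
          have hcne0 : c.filter (fun s => (PySem.Dict.mk lm).getD s 0 == (0:Int)) ≠ [] := by
            intro h0; rw [h0] at hc0; simp at hc0
          obtain ⟨m0, hm0⟩ : ∃ m0, PySem.List.min? (c.filter (fun s => (PySem.Dict.mk lm).getD s 0 == (0:Int))) (fun x => x) = some m0 :=
            Option.ne_none_iff_exists'.mp (fun h0 => hcne0 ((PySem.List.min?_eq_none_iff _ _).mp h0))
          have hm0f := PySem.List.min?_mem hm0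
          have hm0c : m0 ∈ c := (List.mem_filter.mp hm0f).1
          have hne01 : m0 ≠ m1 := by
            intro h0
            have := (List.mem_filter.mp hm0f).2
            rw [h0] at this
            rw [hq0m1] at this
            exact Bool.false_ne_true this
          have hm0c' : m0 ∈ c.erase m1 := (List.mem_erase_of_ne hne01).mpr hm0c
          have e2 : (PySem.List.remove? (c.erase m1) m0).getD (c.erase m1) = (c.erase m1).erase m0 := by
            rw [PySem.List.remove?_eq_some_erase _ m0 hm0c']; rfl
          rw [seqStep_out lm (c.erase m1) (t ++ [m1]) 0 1 0 m0 (hft0.trans ht0)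
            (by rw [hfc0]; exact hc0) (by rw [hfc0]; exact hm0)]
          rw [planStep_out lm c t [] [m1] 0 m0 ht0 hc0 hm0]
          simp [e1, e2]
        · rw [seqStep_none lm (c.erase m1) (t ++ [m1]) 0 1 0
            (by rw [hfc0, hft0]; exact h0in) (by rw [hfc0, hft0]; exact h0out)]
          rw [planStep_none lm c t [] [m1] 0 h0in h0out]
          simp [e1]
    · rw [seqStep_none lm c t 0 0 1 h1in h1out, planStep_none lm c t [] [] 1 h1in h1out]
      by_cases h0in : c.filter (fun s => (PySem.Dict.mk lm).getD s 0 == (0:Int)) = [] ∧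
          1 < (t.filter (fun s => (PySem.Dict.mk lm).getD s 0 == (0:Int))).length
      · obtain ⟨hc0, ht0⟩ := h0in
        have htne0 : t.filter (fun s => (PySem.Dict.mk lm).getD s 0 == (0:Int)) ≠ [] := by
          intro h0; rw [h0] at ht0; simp at ht0
        obtain ⟨m0, hm0⟩ : ∃ m0, PySem.List.min? (t.filter (fun s => (PySem.Dict.mk lm).getD s 0 == (0:Int))) (fun x => x) = some m0 :=
          Option.ne_none_iff_exists'.mp (fun h0 => htne0 ((PySem.List.min?_eq_none_iff _ _).mp h0))
        have hm0t : m0 ∈ t := (List.mem_filter.mp (PySem.List.min?_mem hm0)).1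
        have e2 : (PySem.List.remove? t m0).getD t = t.erase m0 := by
          rw [PySem.List.remove?_eq_some_erase t m0 hm0t]; rfl
        rw [seqStep_in lm c t 0 0 0 m0 hc0 ht0 hm0, planStep_in lm c t [] [] 0 m0 hc0 ht0 hm0]
        simp [e2]
      · by_cases h0out : t.filter (fun s => (PySem.Dict.mk lm).getD s 0 == (0:Int)) = [] ∧
            1 < (c.filter (fun s => (PySem.Dict.mk lm).getD s 0 == (0:Int))).length
        · obtain ⟨ht0, hc0⟩ := h0out
          have hcne0 : c.filter (fun s => (PySem.Dict.mk lm).getD s 0 == (0:Int)) ≠ [] := by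
            intro h0; rw [h0] at hc0; simp at hc0
          obtain ⟨m0, hm0⟩ : ∃ m0, PySem.List.min? (c.filter (fun s => (PySem.Dict.mk lm).getD s 0 == (0:Int))) (fun x => x) = some m0 :=
            Option.ne_none_iff_exists'.mp (fun h0 => hcne0 ((PySem.List.min?_eq_none_iff _ _).mp h0))
          have hm0c : m0 ∈ c := (List.mem_filter.mp (PySem.List.min?_mem hm0)).1
          have e2 : (PySem.List.remove? c m0).getD c = c.erase m0 := by
            rw [PySem.List.remove?_eq_some_erase c m0 hm0c]; rfl
          rw [seqStep_out lm c t 0 0 0 m0 ht0 hc0 hm0, planStep_out lm c t [] [] 0 m0 ht0 hc0 hm0]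
          simp [e2]
        · rw [seqStep_none lm c t 0 0 0 h0in h0out, planStep_none lm c t [] [] 0 h0in h0out]
          simp

-- ===== VERDICT (by name: the statement is the Claim_ definition above) =====
theorem rebalance_val_subsets_for_binary_py_spec : Claim_equal_rebalance_val_subsets_for_binary_py := by
  intro c t lm _
  unfold Spec_rebalance_val_subsets_for_binary_py
  unfold rebalance_val_subsets_for_binary_py rebalance_val_subsets_for_binary_py_alt
  simp only [List.foldl]
  rw [step_eq lm _ _ 0 0 1 (Or.inl rfl)]
  rw [step_eq lm _ _ _ _ 0 (Or.inr rfl)]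
  simp only [List.map_id']
  rw [seq_eq_plan lm c t]
  rfl
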